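-- pv_equiv track=rewrite | github.com/XIAOMANSDK/B6x | xm_b6_mcp/src/core/markdown_table_parser.py | _split_by_sheets
-- ===== SOURCE A (Python) =====
-- from typing import List, Dict, Any, Tuple, Optional
--
-- def _split_by_sheets(md_content: str) -> List[Tuple[str, str]]:
--     """
--     Split Markdown content by sheet headings.
--
--     Args:
--         md_content: Full Markdown content
--
--     Returns:
--         List of (sheet_name, sheet_content) tuples
--     """
--     sheets = []
--     lines = md_content.split('\n')
--
--     current_sheet = "Default"
--     current_content = []
--
--     for line in lines:
--         # Check for sheet heading (## followed by text, with or without "Sheet:")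
--         if line.strip().startswith('##'):
--             # Save previous sheet if we have content
--             if current_content:
--                 sheets.append((current_sheet, '\n'.join(current_content)))
--
--             # Extract sheet name
--             heading_text = line.strip()[2:].strip()  # Remove ##
--             if ':' in heading_text:
--                 sheet_name = heading_text.split(':', 1)[1].strip()
--             else:
--                 sheet_name = heading_text
--             current_sheet = sheet_name
--             current_content = []
--         else:
--             current_content.append(line)
--
--     # Save last sheet
--     if current_content:
--         sheets.append((current_sheet, '\n'.join(current_content)))
--
--     return sheets
-- ===== SOURCE B (Python) =====
-- def _is_heading(line):
--     return line.strip().startswith('##')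
--
--
-- def _sheet_name(line):
--     heading_text = line.strip()[2:].strip()
--     if ':' in heading_text:
--         return heading_text.split(':', 1)[1].strip()
--     return heading_text
--
--
-- def _split_by_sheets(md_content):
--     lines = md_content.split('\n')
--     out = []
--     cur = "Default"
--     i, n = 0, len(lines)
--     while i < n:
--         j = i
--         while j < n and not _is_heading(lines[j]):
--             j += 1
--         if j > i:
--             out.append((cur, '\n'.join(lines[i:j])))
--         if j == n:
--             break
--         cur = _sheet_name(lines[j])
--         i = j + 1
--     return out
-- ===== Notes on version B (the rewrite author's own statement) =====
-- stated objective: alternative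
-- what changed: Replaced A's single-pass fold that mutates (sheets, current_sheet, current_content) with an index-based segment scanner: an outer loop finds the next heading, slices the whole segment lines[i:j] at once, and emits it, so no per-line accumulator list is maintained.
import Mathlib
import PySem

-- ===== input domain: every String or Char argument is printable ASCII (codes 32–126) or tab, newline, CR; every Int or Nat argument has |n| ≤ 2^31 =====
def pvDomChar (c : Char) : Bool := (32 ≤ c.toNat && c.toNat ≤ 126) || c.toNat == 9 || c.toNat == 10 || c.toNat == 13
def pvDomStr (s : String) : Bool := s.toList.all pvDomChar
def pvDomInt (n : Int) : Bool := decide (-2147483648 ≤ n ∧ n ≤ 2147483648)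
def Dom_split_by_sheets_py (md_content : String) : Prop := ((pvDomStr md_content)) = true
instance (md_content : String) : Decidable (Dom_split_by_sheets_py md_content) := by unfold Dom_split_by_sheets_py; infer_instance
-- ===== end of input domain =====

-- B is an alternative decomposition: instead of A's one-pass fold carrying (sheets, current_sheet,
-- current_content), it scans to the next heading and emits whole segments; return values are equal.

-- shared low-level helpers (verbatim Python idioms used identically by both sources)
-- line.strip().startswith('##')
def pvIsHead (line : String) : Bool := PySem.Str.startswith (PySem.Str.strip line) "##"

-- strip()[2:].strip(), then split(':',1)[1].strip() if ':' present
def pvName (line : String) : String :=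
  let heading := PySem.Str.strip (PySem.Str.slice (PySem.Str.strip line) (some 2) none)
  if PySem.Str.isIn ":" heading then
    PySem.Str.strip (((PySem.Str.splitMax? heading ":" 1).getD []).getD 1 "")
  else heading

-- '\n'.join(cs)
def pvJoin (cs : List String) : String := PySem.Str.join "\n" cs

-- md_content.split('\n')  (separator nonempty, so split? is always some)
def pvLines (md_content : String) : List String := (PySem.Str.split? md_content "\n").getD []

-- ===== PORT A =====
-- one step of A's for-loop over the state (sheets, current_sheet, current_content)
def pvStepA (st : List (String × String) × String × List String) (line : String) :
    List (String × String) × String × List String :=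
  if pvIsHead line then
    ((if st.2.2.isEmpty then st.1 else st.1 ++ [(st.2.1, pvJoin st.2.2)]), pvName line, [])
  else (st.1, st.2.1, st.2.2 ++ [line])

def split_by_sheets_py (md_content : String) : List (String × String) :=
  let st := (pvLines md_content).foldl pvStepA ([], "Default", [])
  if st.2.2.isEmpty then st.1 else st.1 ++ [(st.2.1, pvJoin st.2.2)]

-- ===== PORT B =====
-- B's outer while-loop: take the segment up to the next heading, emit it if non-empty,
-- then continue after the heading under its parsed name.
def pvSegGo (cur : String) (ls : List String) : List (String × String) :=
  let seg := ls.takeWhile (fun l => !pvIsHead l)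
  let out : List (String × String) := if seg.isEmpty then [] else [(cur, pvJoin seg)]
  match h : ls.dropWhile (fun l => !pvIsHead l) with
  | [] => out
  | hd :: t => out ++ pvSegGo (pvName hd) t
termination_by ls.length
decreasing_by
  have hle : (ls.dropWhile (fun l => !pvIsHead l)).length ≤ ls.length :=
    (List.dropWhile_sublist _).length_le
  rw [h] at hle; simp at hle; omega

def split_by_sheets_py_alt (md_content : String) : List (String × String) :=
  pvSegGo "Default" (pvLines md_content)

-- ===== PRECONDITION & SPEC =====
def Spec_split_by_sheets_py (md_content : String) (out : List (String × String)) : Prop := out = split_by_sheets_py_alt md_content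
instance (md_content : String) (out : List (String × String)) : Decidable (Spec_split_by_sheets_py md_content out) := by unfold Spec_split_by_sheets_py; infer_instance

-- ===== CLAIM (what is proved, stated in full; the proofs are below) =====
def Claim_equal_split_by_sheets_py : Prop := ∀ (md_content : String), Dom_split_by_sheets_py md_content → Spec_split_by_sheets_py md_content (split_by_sheets_py md_content)

-- ===== LEMMAS AND PROOFS =====

-- pvSegGo with a pending prefix acc of already-scanned segment lines
def pvSegGoP (cur : String) (acc : List String) (ls : List String) : List (String × String) :=
  (if (acc ++ ls.takeWhile (fun l => !pvIsHead l)).isEmpty then []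
   else [(cur, pvJoin (acc ++ ls.takeWhile (fun l => !pvIsHead l)))]) ++
  (match ls.dropWhile (fun l => !pvIsHead l) with
   | [] => []
   | hd :: t => pvSegGo (pvName hd) t)

lemma pvSegGo_eq (cur : String) (ls : List String) : pvSegGo cur ls = pvSegGoP cur [] ls := by
  rw [pvSegGo]; unfold pvSegGoP
  cases h : ls.dropWhile (fun l => !pvIsHead l) <;> simp

lemma pvFold_eq (ls : List String) :
    ∀ (sheets : List (String × String)) (cur : String) (acc : List String),
      (let st := ls.foldl pvStepA (sheets, cur, acc)
       if st.2.2.isEmpty then st.1 else st.1 ++ [(st.2.1, pvJoin st.2.2)]) =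
      sheets ++ pvSegGoP cur acc ls := by
  induction ls with
  | nil =>
    intro sheets cur acc
    unfold pvSegGoP
    by_cases h : acc.isEmpty <;> simp [h]
  | cons l t ih =>
    intro sheets cur acc
    by_cases hl : pvIsHead l
    · simp only [List.foldl_cons, pvStepA, hl, if_true]
      rw [ih, ← pvSegGo_eq]
      unfold pvSegGoP
      simp only [List.takeWhile_cons, List.dropWhile_cons, hl, Bool.not_true,
        Bool.false_eq_true, if_false, List.append_nil]
      by_cases h : acc.isEmpty <;> simp [h]
    · simp only [List.foldl_cons, pvStepA, hl, if_false, Bool.false_eq_true]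
      rw [ih]
      unfold pvSegGoP
      simp [hl]

-- ===== VERDICT (by name: the statement is the Claim_ definition above) =====
theorem split_by_sheets_py_spec : Claim_equal_split_by_sheets_py := by
  intro md _
  unfold Spec_split_by_sheets_py split_by_sheets_py split_by_sheets_py_alt
  rw [pvFold_eq, ← pvSegGo_eq]
  simp
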